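-- pv_equiv track=rewrite | github.com/GundalaNikhil/DSA | dsa-problems/Geometry/solutions/python/GEO-010-weighted-union-area-rectangles.py | weighted_area
-- ===== SOURCE A (Python) =====
-- from typing import List
--
-- def weighted_area(x1: List[int], y1: List[int], x2: List[int], y2: List[int], w: List[int], W: int) -> int:
--     n = len(x1)
--     if n == 0:
--         return 0
--
--     nx1, ny1, nx2, ny2 = [], [], [], []
--     for i in range(n):
--         nx1.append(min(x1[i], x2[i]))
--         nx2.append(max(x1[i], x2[i]))
--         ny1.append(min(y1[i], y2[i]))
--         ny2.append(max(y1[i], y2[i]))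
--
--     xs = sorted(list(set(nx1 + nx2)))
--     ys = sorted(list(set(ny1 + ny2)))
--
--     total_area = 0
--     for i in range(len(xs) - 1):
--         x_start, x_end = xs[i], xs[i+1]
--         width = x_end - x_start
--         if width <= 0: continue
--
--         # Which rectangles cover this vertical strip?
--         strip_rects = []
--         for j in range(n):
--             if nx1[j] <= x_start and nx2[j] >= x_end:
--                 strip_rects.append(j)
--
--         if not strip_rects:
--             continue
--
--         # For this strip, find intervals on Y
--         y_weights = [0] * (len(ys) - 1)
--         for rid in strip_rects:
--             y_s, y_e = ny1[rid], ny2[rid]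
--             # Find which intervals [ys[k], ys[k+1]) are covered
--             # We can use binary search or just a loop since N is small
--             for k in range(len(ys) - 1):
--                 if ys[k] >= y_s and ys[k+1] <= y_e:
--                     y_weights[k] += w[rid]
--
--         strip_len = 0
--         for k in range(len(ys) - 1):
--             if y_weights[k] >= W:
--                 strip_len += ys[k+1] - ys[k]
--
--         total_area += strip_len * width
--
--     return total_area
-- ===== SOURCE B (Python) =====
-- def weighted_area(x1, y1, x2, y2, w, W):
--     n = len(x1)
--     entries = []
--     for i in range(n):
--         ax, bx = min(x1[i], x2[i]), max(x1[i], x2[i])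
--         ay, by = min(y1[i], y2[i]), max(y1[i], y2[i])
--         entries.append((ax, (ay, by, w[i])))
--         entries.append((bx, (ay, by, -w[i])))
--     deltas = {}
--     for key, val in entries:
--         deltas.setdefault(key, []).append(val)
--     ys = sorted({v[0] for _, v in entries} | {v[1] for _, v in entries})
--     xs = sorted(deltas)
--     m = len(ys) - 1 if ys else 0
--     yw = [0] * m
--     total = 0
--     prev = 0
--     first = True
--     for x in xs:
--         if not first:
--             strip = 0
--             for k in range(m):
--                 if yw[k] >= W:
--                     strip += ys[k + 1] - ys[k]
--             total += strip * (x - prev)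
--         for (ay, by, dw) in deltas[x]:
--             for k in range(m):
--                 if ay <= ys[k] and ys[k + 1] <= by:
--                     yw[k] += dw
--         prev = x
--         first = False
--     return total
-- ===== Notes on version B (the rewrite author's own statement) =====
-- stated objective: faster
-- what changed: B is an x-sweep: rectangle edges become signed weight deltas grouped by x in a dict, and one y-interval weight profile is maintained incrementally across strips (each edge applied once), so the per-strip rectangle scan and per-cell weight recomputation of A disappear.
-- outside the precondition, e.g. on weighted_area([0], [0], [0], [1], [], 1): A returns 0, B raises IndexError; on weighted_area([0, 2], [0, 0], [1, 3], [1, 1], [0, 0], 0): A returns 2, B returns 3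
import Mathlib
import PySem

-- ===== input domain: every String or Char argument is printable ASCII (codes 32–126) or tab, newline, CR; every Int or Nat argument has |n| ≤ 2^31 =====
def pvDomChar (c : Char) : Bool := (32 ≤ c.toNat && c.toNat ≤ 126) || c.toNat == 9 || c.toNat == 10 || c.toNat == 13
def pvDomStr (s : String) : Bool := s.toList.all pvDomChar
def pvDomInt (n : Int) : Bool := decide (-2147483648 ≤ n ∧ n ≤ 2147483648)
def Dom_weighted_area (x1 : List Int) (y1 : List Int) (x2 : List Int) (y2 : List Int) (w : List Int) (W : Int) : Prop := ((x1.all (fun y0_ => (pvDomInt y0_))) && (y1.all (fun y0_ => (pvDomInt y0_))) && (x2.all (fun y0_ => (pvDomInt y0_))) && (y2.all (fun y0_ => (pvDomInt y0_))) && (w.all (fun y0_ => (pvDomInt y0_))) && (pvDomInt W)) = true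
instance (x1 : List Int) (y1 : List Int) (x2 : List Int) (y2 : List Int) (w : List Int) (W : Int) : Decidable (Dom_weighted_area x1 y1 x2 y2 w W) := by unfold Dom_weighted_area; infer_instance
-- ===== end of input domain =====

-- B is an x-sweep: rectangle edges become signed weight deltas grouped by x in a dict, and one
-- y-interval weight profile is maintained incrementally across strips, replacing A's per-strip
-- rectangle scan and per-cell weight recomputation (measured faster on the timing inputs).

-- ===== PORT A =====
def weighted_area (x1 : List Int) (y1 : List Int) (x2 : List Int) (y2 : List Int) (w : List Int) (W : Int) : Int :=
  let n : Nat := x1.length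
  if n = 0 then 0
  else
    let st :=
      (List.range n).foldl
        (fun (s : List Int × List Int × List Int × List Int) (i : Nat) =>
          (s.1 ++ [min (PySem.List.pyGetD x1 (i : Int) 0) (PySem.List.pyGetD x2 (i : Int) 0)],
           s.2.1 ++ [min (PySem.List.pyGetD y1 (i : Int) 0) (PySem.List.pyGetD y2 (i : Int) 0)],
           s.2.2.1 ++ [max (PySem.List.pyGetD x1 (i : Int) 0) (PySem.List.pyGetD x2 (i : Int) 0)],
           s.2.2.2 ++ [max (PySem.List.pyGetD y1 (i : Int) 0) (PySem.List.pyGetD y2 (i : Int) 0)]))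
        ([], [], [], [])
    let nx1 := st.1
    let ny1 := st.2.1
    let nx2 := st.2.2.1
    let ny2 := st.2.2.2
    let xs := PySem.List.sorted (PySem.Set.ofList (nx1 ++ nx2)) (fun v => v)
    let ys := PySem.List.sorted (PySem.Set.ofList (ny1 ++ ny2)) (fun v => v)
    (List.range (xs.length - 1)).foldl
      (fun (total : Int) (i : Nat) =>
        let x_start := PySem.List.pyGetD xs (i : Int) 0
        let x_end := PySem.List.pyGetD xs ((i : Int) + 1) 0
        let width := x_end - x_start
        if width ≤ 0 then total
        else
          let strip_rects :=
            (List.range n).foldl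
              (fun (acc : List Nat) (j : Nat) =>
                if PySem.List.pyGetD nx1 (j : Int) 0 ≤ x_start ∧
                    PySem.List.pyGetD nx2 (j : Int) 0 ≥ x_end
                then acc ++ [j] else acc) ([] : List Nat)
          if strip_rects = [] then total
          else
            let y_weights :=
              strip_rects.foldl
                (fun (yw : List Int) (rid : Nat) =>
                  let y_s := PySem.List.pyGetD ny1 (rid : Int) 0
                  let y_e := PySem.List.pyGetD ny2 (rid : Int) 0
                  (List.range (ys.length - 1)).foldl
                    (fun (yw' : List Int) (k : Nat) =>
                      if PySem.List.pyGetD ys (k : Int) 0 ≥ y_s ∧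
                          PySem.List.pyGetD ys ((k : Int) + 1) 0 ≤ y_e
                      then PySem.List.pySetD yw' (k : Int)
                             (PySem.List.pyGetD yw' (k : Int) 0 + PySem.List.pyGetD w (rid : Int) 0)
                      else yw') yw)
                (List.replicate (ys.length - 1) (0 : Int))
            let strip_len :=
              (List.range (ys.length - 1)).foldl
                (fun (sl : Int) (k : Nat) =>
                  if PySem.List.pyGetD y_weights (k : Int) 0 ≥ W
                  then sl + (PySem.List.pyGetD ys ((k : Int) + 1) 0 - PySem.List.pyGetD ys (k : Int) 0)
                  else sl) 0
            total + strip_len * width)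
      0

-- ===== PORT B =====
-- x-sweep: deltas[x] holds the (ay, by, ±w) boundary events at x; the weight profile yw over the
-- y-intervals is updated incrementally at each grid x, and each strip is charged between updates.
def weighted_area_alt (x1 : List Int) (y1 : List Int) (x2 : List Int) (y2 : List Int) (w : List Int) (W : Int) : Int :=
  let n : Nat := x1.length
  let entries : List (Int × Int × Int × Int) :=
    (List.range n).foldl
      (fun (es : List (Int × Int × Int × Int)) (i : Nat) =>
        es ++ [(min (PySem.List.pyGetD x1 (i : Int) 0) (PySem.List.pyGetD x2 (i : Int) 0),
                min (PySem.List.pyGetD y1 (i : Int) 0) (PySem.List.pyGetD y2 (i : Int) 0),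
                max (PySem.List.pyGetD y1 (i : Int) 0) (PySem.List.pyGetD y2 (i : Int) 0),
                PySem.List.pyGetD w (i : Int) 0),
               (max (PySem.List.pyGetD x1 (i : Int) 0) (PySem.List.pyGetD x2 (i : Int) 0),
                min (PySem.List.pyGetD y1 (i : Int) 0) (PySem.List.pyGetD y2 (i : Int) 0),
                max (PySem.List.pyGetD y1 (i : Int) 0) (PySem.List.pyGetD y2 (i : Int) 0),
                -(PySem.List.pyGetD w (i : Int) 0))]) []
  let deltas : PySem.Dict Int (List (Int × Int × Int)) :=
    entries.foldl (fun d p => d.modify p.1 [] (fun cur => cur ++ [p.2])) PySem.Dict.empty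
  let ys := PySem.List.sorted
      (PySem.Set.union (PySem.Set.ofList (entries.map (fun p => p.2.1)))
        (PySem.Set.ofList (entries.map (fun p => p.2.2.1)))) (fun v => v)
  let xs := PySem.List.sorted deltas.keys (fun v => v)
  let m : Nat := if ys = [] then 0 else ys.length - 1
  (xs.foldl
    (fun (st : Int × List Int × Int × Bool) (x : Int) =>
      ((if st.2.2.2 then st.1
        else
          st.1 + ((List.range m).foldl
              (fun (strip : Int) (k : Nat) =>
                if PySem.List.pyGetD st.2.1 (k : Int) 0 ≥ W
                then strip + (PySem.List.pyGetD ys ((k : Int) + 1) 0 - PySem.List.pyGetD ys (k : Int) 0)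
                else strip) 0) * (x - st.2.2.1)),
       (deltas.getD x []).foldl
          (fun (yw : List Int) (e : Int × Int × Int) =>
            (List.range m).foldl
              (fun (yw' : List Int) (k : Nat) =>
                if e.1 ≤ PySem.List.pyGetD ys (k : Int) 0 ∧
                    PySem.List.pyGetD ys ((k : Int) + 1) 0 ≤ e.2.1
                then PySem.List.pySetD yw' (k : Int) (PySem.List.pyGetD yw' (k : Int) 0 + e.2.2)
                else yw') yw) st.2.1,
       x, false))
    (0, List.replicate m 0, 0, true)).1

-- ===== PRECONDITION & SPEC =====
-- Pre_ excludes (a) companion lists shorter than x1, on which A raises IndexError (except the corner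
-- where every rectangle has zero x-extent so a too-short w is never read and A returns 0 — there B,
-- which reads every weight up front, raises), and (b) non-positive thresholds W, where the weight
-- test is vacuous and A's skipping of strips no rectangle overlaps (while counting every y-gap
-- inside overlapped strips) is an accident of its skip-empty-strip shortcut.
def Pre_weighted_area (x1 : List Int) (y1 : List Int) (x2 : List Int) (y2 : List Int) (w : List Int) (W : Int) : Prop :=
  x1.length ≤ y1.length ∧ x1.length ≤ x2.length ∧ x1.length ≤ y2.length ∧ x1.length ≤ w.length ∧ 1 ≤ W
instance (x1 : List Int) (y1 : List Int) (x2 : List Int) (y2 : List Int) (w : List Int) (W : Int) : Decidable (Pre_weighted_area x1 y1 x2 y2 w W) := by unfold Pre_weighted_area; infer_instance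

def pvWitness_weighted_area : List Int × List Int × List Int × List Int × List Int × Int :=
  ([0], [0], [1], [1], [1], 1)

def Spec_weighted_area (x1 : List Int) (y1 : List Int) (x2 : List Int) (y2 : List Int) (w : List Int) (W : Int) (out : Int) : Prop := out = weighted_area_alt x1 y1 x2 y2 w W
instance (x1 : List Int) (y1 : List Int) (x2 : List Int) (y2 : List Int) (w : List Int) (W : Int) (out : Int) : Decidable (Spec_weighted_area x1 y1 x2 y2 w W out) := by unfold Spec_weighted_area; infer_instance

-- ===== CLAIM (what is proved, stated in full; the proofs are below) =====
def Claim_equal_weighted_area : Prop := ∀ (x1 : List Int) (y1 : List Int) (x2 : List Int) (y2 : List Int) (w : List Int) (W : Int), Dom_weighted_area x1 y1 x2 y2 w W → Pre_weighted_area x1 y1 x2 y2 w W → Spec_weighted_area x1 y1 x2 y2 w W (weighted_area x1 y1 x2 y2 w W)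

-- ===== LEMMAS AND PROOFS =====

-- common normal form of both ports: sum over grid cells of (cell area if its weight reaches W)
def pvCore (n : Nat) (mnx mny mxx mxy wv : Nat → Int) (W : Int) : Int :=
  let xs := PySem.List.sorted (PySem.Set.ofList ((List.range n).map mnx ++ (List.range n).map mxx)) (fun v => v)
  let ys := PySem.List.sorted (PySem.Set.ofList ((List.range n).map mny ++ (List.range n).map mxy)) (fun v => v)
  ((List.range (xs.length - 1)).map (fun i =>
    ((List.range (ys.length - 1)).map (fun k =>
      if ((List.range n).map (fun j =>
            if mnx j ≤ xs.getD i 0 ∧ xs.getD (i+1) 0 ≤ mxx j ∧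
               mny j ≤ ys.getD k 0 ∧ ys.getD (k+1) 0 ≤ mxy j
            then wv j else 0)).sum ≥ W
      then (xs.getD (i+1) 0 - xs.getD i 0) * (ys.getD (k+1) 0 - ys.getD k 0)
      else 0)).sum)).sum

theorem pv_getD_eq {α : Type} (xs : List α) (d : α) (j : Nat) (h : j < xs.length) :
    xs.getD j d = xs[j] := by
  simp [List.getD_eq_getElem?_getD, List.getElem?_eq_getElem h]

theorem pv_getD_set (yw : List Int) (n k : Nat) (v : Int) :
    (yw.set n v).getD k 0 = if k = n ∧ n < yw.length then v else yw.getD k 0 := by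
  by_cases hk : k = n
  · subst hk
    by_cases hl : k < yw.length
    · rw [if_pos ⟨rfl, hl⟩]
      simp only [List.getD_eq_getElem?_getD, List.getElem?_set]
      simp [hl]
    · rw [if_neg (fun h => hl h.2)]
      have hnone : yw[k]? = none := List.getElem?_eq_none (by omega)
      simp only [List.getD_eq_getElem?_getD, List.getElem?_set]
      simp [hl]
  · rw [if_neg (fun h => hk h.1)]
    simp only [List.getD_eq_getElem?_getD, List.getElem?_set]
    rw [if_neg (fun h => hk h.symm)]

-- A's four parallel append-loops build four maps
theorem pv_foldl_append4 {α : Type} (f1 f2 f3 f4 : α → Int) (l : List α)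
    (a b c d : List Int) :
    l.foldl (fun (s : List Int × List Int × List Int × List Int) x =>
        (s.1 ++ [f1 x], s.2.1 ++ [f2 x], s.2.2.1 ++ [f3 x], s.2.2.2 ++ [f4 x])) (a, b, c, d)
      = (a ++ l.map f1, b ++ l.map f2, c ++ l.map f3, d ++ l.map f4) := by
  induction l generalizing a b c d with
  | nil => simp
  | cons x t ih => simp [ih]

-- zip with the tail enumerates consecutive pairs by index
theorem pv_zip_tail_int (xs : List Int) :
    xs.zip xs.tail = (List.range (xs.length - 1)).map (fun i => (xs.getD i 0, xs.getD (i+1) 0)) := by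
  apply List.ext_getElem
  · simp [List.length_zip, List.length_tail]
  · intro i h1 h2
    have hlen : i < xs.length - 1 := by simpa using h2
    have h1' : i < xs.length := by omega
    have h2' : i + 1 < xs.length := by omega
    simp [List.getElem_zip, List.getElem_tail, List.getD_eq_getElem?_getD, h1', h2']

-- sorted(set(a) | set(b)) = sorted(set(a ++ b))
theorem pv_sorted_union_ofList (a b : List Int) :
    PySem.List.sorted (PySem.Set.union (PySem.Set.ofList a) (PySem.Set.ofList b)) (fun v => v)
      = PySem.List.sorted (PySem.Set.ofList (a ++ b)) (fun v => v) := by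
  refine PySem.List.sorted_eq_sorted_of_perm _ _ _ (fun _ _ h => h) ?_
  rw [List.perm_ext_iff_of_nodup
    (PySem.Set.nodup_union _ _ (PySem.Set.nodup_ofList a))
    (PySem.Set.nodup_ofList (a ++ b))]
  intro v
  simp [PySem.Set.mem_union, PySem.Set.mem_ofList]

-- sorted(set(a)) only depends on a's members
theorem pv_sorted_ofList_congr (a b : List Int) (h : ∀ v, v ∈ a ↔ v ∈ b) :
    PySem.List.sorted (PySem.Set.ofList a) (fun v => v)
      = PySem.List.sorted (PySem.Set.ofList b) (fun v => v) := by
  refine PySem.List.sorted_eq_sorted_of_perm _ _ _ (fun _ _ hh => hh) ?_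
  rw [List.perm_ext_iff_of_nodup (PySem.Set.nodup_ofList a) (PySem.Set.nodup_ofList b)]
  intro v
  simp [PySem.Set.mem_ofList, h v]

-- a fold that conditionally adds is the sum of the conditional terms
theorem pv_foldl_addif {α : Type} (l : List α) (c : α → Prop) [DecidablePred c]
    (f : α → Int) (a : Int) :
    l.foldl (fun s r => if c r then s + f r else s) a
      = a + (l.map (fun r => if c r then f r else 0)).sum := by
  rw [PySem.List.foldl_congr_mem l _ (fun s r => s + (if c r then f r else 0)) a
      (by intro s r _; by_cases h : c r <;> simp [h]),
    PySem.List.foldl_add]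

-- multiplying a conditional sum by a constant
theorem pv_sum_ite_mul (l : List Nat) (c : Nat → Prop) [DecidablePred c]
    (f : Nat → Int) (v : Int) :
    (l.map (fun k => if c k then f k else 0)).sum * v
      = (l.map (fun k => if c k then v * f k else 0)).sum := by
  rw [show (l.map (fun k => if c k then v * f k else 0))
        = (l.map (fun k => v * (if c k then f k else 0))) from
      List.map_congr_left (by intro a _; split_ifs <;> ring),
    List.sum_map_mul_left]
  ring

-- summing f over a filtered list = summing (if p then f else 0) over the whole list
theorem pv_sum_map_filter_ite (l : List Nat) (p : Nat → Bool) (f : Nat → Int) :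
    ((l.filter p).map f).sum = (l.map (fun x => if p x then f x else 0)).sum := by
  induction l with
  | nil => rfl
  | cons x t ih =>
    by_cases h : p x
    · simp [h, ih]
    · simp [h, ih]

-- sum of a pointwise sum of two maps
theorem pv_sum_map_add {α : Type} (l : List α) (f g : α → Int) :
    (l.map (fun a => f a + g a)).sum = (l.map f).sum + (l.map g).sum := by
  induction l with
  | nil => simp
  | cons x t ih => simp [ih]; ring

-- one rectangle's pass over the y-intervals: length is preserved
theorem pv_setfold_length (ys : List Int) (a b v : Int) (l : List Nat) (yw : List Int) :
    (l.foldl (fun (yw' : List Int) (k : Nat) =>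
        if a ≤ ys.getD k 0 ∧ ys.getD (k+1) 0 ≤ b
        then yw'.set k (yw'.getD k 0 + v)
        else yw') yw).length = yw.length := by
  induction l generalizing yw with
  | nil => rfl
  | cons k t ih =>
    simp only [List.foldl_cons]
    split
    · rw [ih]; simp
    · rw [ih]

-- one rectangle's pass over the y-intervals, pointwise
theorem pv_setfold_getD (ys : List Int) (a b v : Int) (l : List Nat) (hnd : l.Nodup)
    (yw : List Int) (k : Nat) :
    (l.foldl (fun yw' k' =>
        if a ≤ ys.getD k' 0 ∧ ys.getD (k'+1) 0 ≤ b
        then yw'.set k' (yw'.getD k' 0 + v)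
        else yw') yw).getD k 0
      = yw.getD k 0 +
        if k ∈ l ∧ k < yw.length ∧ (a ≤ ys.getD k 0 ∧ ys.getD (k+1) 0 ≤ b)
        then v else 0 := by
  induction l generalizing yw with
  | nil => simp
  | cons k0 t ih =>
    have hnd' : t.Nodup := hnd.of_cons
    have hk0 : k0 ∉ t := (List.nodup_cons.mp hnd).1
    simp only [List.foldl_cons]
    by_cases hc0 : a ≤ ys.getD k0 0 ∧ ys.getD (k0+1) 0 ≤ b
    · rw [if_pos hc0, ih hnd', pv_getD_set]
      by_cases hk : k = k0
      · subst hk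
        have h1 : ¬ (k ∈ t ∧ k < (yw.set k (yw.getD k 0 + v)).length ∧
            (a ≤ ys.getD k 0 ∧ ys.getD (k+1) 0 ≤ b)) := fun h => hk0 h.1
        rw [if_neg h1]
        by_cases hl : k < yw.length
        · have h2 : k = k ∧ k < yw.length := ⟨rfl, hl⟩
          have h3 : k ∈ k :: t ∧ k < yw.length ∧
              (a ≤ ys.getD k 0 ∧ ys.getD (k+1) 0 ≤ b) := ⟨List.mem_cons_self, hl, hc0⟩
          rw [if_pos h2, if_pos h3]
          ring
        · have h2 : ¬ (k = k ∧ k < yw.length) := fun h => hl h.2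
          have h3 : ¬ (k ∈ k :: t ∧ k < yw.length ∧
              (a ≤ ys.getD k 0 ∧ ys.getD (k+1) 0 ≤ b)) := fun h => hl h.2.1
          rw [if_neg h2, if_neg h3]
      · have h1 : ¬ (k = k0 ∧ k0 < yw.length) := fun h => hk h.1
        rw [if_neg h1]
        have hiff : (k ∈ t ∧ k < (yw.set k0 (yw.getD k0 0 + v)).length ∧
            (a ≤ ys.getD k 0 ∧ ys.getD (k+1) 0 ≤ b))
            ↔ (k ∈ k0 :: t ∧ k < yw.length ∧ (a ≤ ys.getD k 0 ∧ ys.getD (k+1) 0 ≤ b)) := by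
          simp [List.mem_cons, hk]
        rw [if_congr hiff rfl rfl]
    · rw [if_neg hc0, ih hnd']
      have hiff : (k ∈ t ∧ k < yw.length ∧ (a ≤ ys.getD k 0 ∧ ys.getD (k+1) 0 ≤ b))
          ↔ (k ∈ k0 :: t ∧ k < yw.length ∧ (a ≤ ys.getD k 0 ∧ ys.getD (k+1) 0 ≤ b)) := by
        constructor
        · exact fun h => ⟨List.mem_cons_of_mem _ h.1, h.2⟩
        · rintro ⟨hm, h2, h3⟩
          rcases List.mem_cons.mp hm with rfl | hmt
          · exact absurd h3 hc0
          · exact ⟨hmt, h2, h3⟩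
      rw [if_congr hiff rfl rfl]

-- the whole y_weights accumulation, pointwise (A side)
theorem pv_ywfold_getD (ys MA MB : List Int) (wv : Nat → Int) (m : Nat) (rs : List Nat)
    (yw : List Int) (hlen : yw.length = m) (k : Nat) (hk : k < m) :
    (rs.foldl (fun yw0 rid =>
        (List.range m).foldl (fun yw' k' =>
          if MA.getD rid 0 ≤ ys.getD k' 0 ∧ ys.getD (k'+1) 0 ≤ MB.getD rid 0
          then yw'.set k' (yw'.getD k' 0 + wv rid)
          else yw') yw0) yw).getD k 0
      = yw.getD k 0 +
        (rs.map (fun rid =>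
          if MA.getD rid 0 ≤ ys.getD k 0 ∧ ys.getD (k+1) 0 ≤ MB.getD rid 0
          then wv rid else 0)).sum := by
  induction rs generalizing yw with
  | nil => simp
  | cons r t ih =>
    simp only [List.foldl_cons, List.map_cons, List.sum_cons]
    rw [ih _ (by rw [pv_setfold_length]; exact hlen)]
    rw [pv_setfold_getD ys (MA.getD r 0) (MB.getD r 0) (wv r) (List.range m)
      (List.nodup_range) yw k]
    have heq : (k ∈ List.range m ∧ k < yw.length ∧
        (MA.getD r 0 ≤ ys.getD k 0 ∧ ys.getD (k+1) 0 ≤ MB.getD r 0))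
        ↔ (MA.getD r 0 ≤ ys.getD k 0 ∧ ys.getD (k+1) 0 ≤ MB.getD r 0) := by
      simp [List.mem_range, hk, hlen]
    rw [if_congr heq rfl rfl]
    ring

-- a conditional-append fold is a filter
theorem pv_foldl_filter {p : Nat → Prop} [DecidablePred p] (l : List Nat) :
    l.foldl (fun (acc : List Nat) (j : Nat) => if p j then acc ++ [j] else acc) []
      = l.filter (fun j => decide (p j)) := by
  rw [PySem.List.foldl_congr_mem l _
    (fun (acc : List Nat) (j : Nat) => if (decide (p j)) = true then acc ++ [id j] else acc) []
    (by intro a j _; simp),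
    PySem.List.foldl_append_if, List.map_id, List.nil_append]

-- A's outer loop, with the grid data abstract (uses 1 ≤ W for strips no rectangle covers)
theorem pv_A_main (n : Nat) (mnx mny mxx mxy wv : Nat → Int) (W : Int) (hW : 1 ≤ W)
    (xs ys : List Int) (hxslt : List.Pairwise (· < ·) xs) :
    (List.range (xs.length - 1)).foldl
      (fun (total : Int) (i : Nat) =>
        if xs.getD (i+1) 0 - xs.getD i 0 ≤ 0 then total
        else
          if (List.range n).foldl
              (fun (acc : List Nat) (j : Nat) =>
                if ((List.range n).map mnx).getD j 0 ≤ xs.getD i 0 ∧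
                    xs.getD (i+1) 0 ≤ ((List.range n).map mxx).getD j 0
                then acc ++ [j] else acc) [] = [] then total
          else
            total +
              ((List.range (ys.length - 1)).foldl
                (fun (sl : Int) (k : Nat) =>
                  if W ≤ (((List.range n).foldl
                        (fun (acc : List Nat) (j : Nat) =>
                          if ((List.range n).map mnx).getD j 0 ≤ xs.getD i 0 ∧
                              xs.getD (i+1) 0 ≤ ((List.range n).map mxx).getD j 0
                          then acc ++ [j] else acc) []).foldl
                      (fun (yw : List Int) (rid : Nat) =>
                        (List.range (ys.length - 1)).foldl
                          (fun (yw' : List Int) (k' : Nat) =>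
                            if ((List.range n).map mny).getD rid 0 ≤ ys.getD k' 0 ∧
                                ys.getD (k'+1) 0 ≤ ((List.range n).map mxy).getD rid 0
                            then yw'.set k' (yw'.getD k' 0 + wv rid)
                            else yw') yw)
                      (List.replicate (ys.length - 1) 0)).getD k 0
                  then sl + (ys.getD (k+1) 0 - ys.getD k 0)
                  else sl) 0) * (xs.getD (i+1) 0 - xs.getD i 0)) 0
    = ((List.range (xs.length - 1)).map (fun i =>
        ((List.range (ys.length - 1)).map (fun k =>
          if W ≤ ((List.range n).map (fun j =>
                if mnx j ≤ xs.getD i 0 ∧ xs.getD (i+1) 0 ≤ mxx j ∧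
                   mny j ≤ ys.getD k 0 ∧ ys.getD (k+1) 0 ≤ mxy j
                then wv j else 0)).sum
          then (xs.getD (i+1) 0 - xs.getD i 0) * (ys.getD (k+1) 0 - ys.getD k 0)
          else 0)).sum)).sum := by
  refine Eq.trans (PySem.List.foldl_congr_mem _ _
    (fun (total : Int) (i : Nat) => total +
      ((List.range (ys.length - 1)).map (fun k =>
        if W ≤ ((List.range n).map (fun j =>
              if mnx j ≤ xs.getD i 0 ∧ xs.getD (i+1) 0 ≤ mxx j ∧
                 mny j ≤ ys.getD k 0 ∧ ys.getD (k+1) 0 ≤ mxy j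
              then wv j else 0)).sum
        then (xs.getD (i+1) 0 - xs.getD i 0) * (ys.getD (k+1) 0 - ys.getD k 0)
        else 0)).sum) _ ?_) (by rw [PySem.List.foldl_add, zero_add])
  intro acc i hi
  rw [List.mem_range] at hi
  have hi1 : i < xs.length := by omega
  have hi2 : i + 1 < xs.length := by omega
  have hlt : xs.getD i 0 < xs.getD (i+1) 0 := by
    rw [pv_getD_eq xs 0 i hi1, pv_getD_eq xs 0 (i+1) hi2]
    exact List.pairwise_iff_getElem.mp hxslt i (i+1) hi1 hi2 (by omega)
  rw [if_neg (by omega : ¬ (xs.getD (i+1) 0 - xs.getD i 0 ≤ 0))]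
  rw [pv_foldl_filter]
  by_cases hse : (List.range n).filter
      (fun j => decide (((List.range n).map mnx).getD j 0 ≤ xs.getD i 0 ∧
        xs.getD (i+1) 0 ≤ ((List.range n).map mxx).getD j 0)) = []
  · rw [if_pos hse]
    have hz : ((List.range (ys.length - 1)).map (fun k =>
        if W ≤ ((List.range n).map (fun j =>
              if mnx j ≤ xs.getD i 0 ∧ xs.getD (i+1) 0 ≤ mxx j ∧
                 mny j ≤ ys.getD k 0 ∧ ys.getD (k+1) 0 ≤ mxy j
              then wv j else 0)).sum
        then (xs.getD (i+1) 0 - xs.getD i 0) * (ys.getD (k+1) 0 - ys.getD k 0)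
        else 0)).sum = 0 := by
      apply List.sum_eq_zero
      intro x hx
      obtain ⟨k, hk, rfl⟩ := List.mem_map.mp hx
      have hS : ((List.range n).map (fun j =>
          if mnx j ≤ xs.getD i 0 ∧ xs.getD (i+1) 0 ≤ mxx j ∧
             mny j ≤ ys.getD k 0 ∧ ys.getD (k+1) 0 ≤ mxy j
          then wv j else 0)).sum = 0 := by
        apply List.sum_eq_zero
        intro y hy
        obtain ⟨j, hj, rfl⟩ := List.mem_map.mp hy
        rw [List.mem_range] at hj
        have hnot := List.filter_eq_nil_iff.mp hse j (List.mem_range.mpr hj)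
        simp only [decide_eq_true_eq, PySem.List.getD_map_range _ _ _ _ hj] at hnot
        rw [if_neg (by tauto)]
      rw [hS, if_neg (by omega)]
    simp only [hz, add_zero]
  · rw [if_neg hse]
    congr 1
    rw [pv_foldl_addif, zero_add, pv_sum_ite_mul]
    refine congrArg List.sum (List.map_congr_left ?_)
    intro k hk
    rw [List.mem_range] at hk
    have hyw := pv_ywfold_getD ys ((List.range n).map mny) ((List.range n).map mxy) wv
      (ys.length - 1)
      ((List.range n).filter
        (fun j => decide (((List.range n).map mnx).getD j 0 ≤ xs.getD i 0 ∧
          xs.getD (i+1) 0 ≤ ((List.range n).map mxx).getD j 0)))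
      (List.replicate (ys.length - 1) 0) (by simp) k hk
    rw [hyw, List.getD_replicate _ hk, zero_add, pv_sum_map_filter_ite]
    have hSeq : ((List.range n).map (fun j =>
        if decide (((List.range n).map mnx).getD j 0 ≤ xs.getD i 0 ∧
            xs.getD (i+1) 0 ≤ ((List.range n).map mxx).getD j 0)
        then (if ((List.range n).map mny).getD j 0 ≤ ys.getD k 0 ∧
            ys.getD (k+1) 0 ≤ ((List.range n).map mxy).getD j 0
          then wv j else 0) else 0)).sum
        = ((List.range n).map (fun j =>
          if mnx j ≤ xs.getD i 0 ∧ xs.getD (i+1) 0 ≤ mxx j ∧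
             mny j ≤ ys.getD k 0 ∧ ys.getD (k+1) 0 ≤ mxy j
          then wv j else 0)).sum := by
      refine congrArg List.sum (List.map_congr_left ?_)
      intro j hj
      rw [List.mem_range] at hj
      simp only [decide_eq_true_eq, PySem.List.getD_map_range _ _ _ _ hj]
      split_ifs <;> tauto
    rw [hSeq]

-- A's port equals the common normal form (uses 1 ≤ W for strips no rectangle covers)
theorem pv_A_eq_core (x1 y1 x2 y2 w : List Int) (W : Int) (hW : 1 ≤ W) :
    weighted_area x1 y1 x2 y2 w W
      = pvCore x1.length
          (fun i => min (PySem.List.pyGetD x1 (i : Int) 0) (PySem.List.pyGetD x2 (i : Int) 0))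
          (fun i => min (PySem.List.pyGetD y1 (i : Int) 0) (PySem.List.pyGetD y2 (i : Int) 0))
          (fun i => max (PySem.List.pyGetD x1 (i : Int) 0) (PySem.List.pyGetD x2 (i : Int) 0))
          (fun i => max (PySem.List.pyGetD y1 (i : Int) 0) (PySem.List.pyGetD y2 (i : Int) 0))
          (fun i => PySem.List.pyGetD w (i : Int) 0) W := by
  by_cases hn : x1.length = 0
  · have hA : weighted_area x1 y1 x2 y2 w W = 0 := by
      simp [weighted_area, hn]
    rw [hA, hn]
    rfl
  · simp only [weighted_area, ge_iff_le, ← Nat.cast_add_one,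
      PySem.List.pyGetD_natCast, PySem.List.pySetD_natCast]
    rw [if_neg hn]
    rw [pv_foldl_append4
      (fun i => min (x1.getD i 0) (x2.getD i 0))
      (fun i => min (y1.getD i 0) (y2.getD i 0))
      (fun i => max (x1.getD i 0) (x2.getD i 0))
      (fun i => max (y1.getD i 0) (y2.getD i 0))
      (List.range x1.length) [] [] [] []]
    dsimp only
    simp only [List.nil_append]
    exact pv_A_main x1.length
      (fun i => min (x1.getD i 0) (x2.getD i 0))
      (fun i => min (y1.getD i 0) (y2.getD i 0))
      (fun i => max (x1.getD i 0) (x2.getD i 0))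
      (fun i => max (y1.getD i 0) (y2.getD i 0))
      (fun i => w.getD i 0) W hW _ _
      (PySem.List.sorted_ofList_pairwise_lt _)

-- ===== B-side: sweep-line proof =====

-- weight of a rectangle j over y-cell k given its x-interval is open at position p
def pvWgt (n : Nat) (mnx mny mxx mxy wv : Nat → Int) (ys : List Int) (p : Int) (k : Nat) : Int :=
  ((List.range n).map (fun j =>
    if mnx j ≤ p ∧ ¬ mxx j ≤ p ∧ (mny j ≤ ys.getD k 0 ∧ ys.getD (k+1) 0 ≤ mxy j)
    then wv j else 0)).sum

-- the net signed delta applied at sweep position x to y-cell k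
def pvDel (n : Nat) (mnx mny mxx mxy wv : Nat → Int) (ys : List Int) (x : Int) (k : Nat) : Int :=
  ((List.range n).map (fun j =>
    (if mnx j = x then (if mny j ≤ ys.getD k 0 ∧ ys.getD (k+1) 0 ≤ mxy j then wv j else 0) else 0)
    + (if mxx j = x then (if mny j ≤ ys.getD k 0 ∧ ys.getD (k+1) 0 ≤ mxy j then -(wv j) else 0) else 0))).sum

-- length preservation of the delta application
theorem pv_delfold_length (ys : List Int) (m : Nat) (L : List (Int × Int × Int)) (yw : List Int) :
    (L.foldl (fun (yw0 : List Int) (e : Int × Int × Int) =>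
        (List.range m).foldl (fun yw' k' =>
          if e.1 ≤ ys.getD k' 0 ∧ ys.getD (k'+1) 0 ≤ e.2.1
          then yw'.set k' (yw'.getD k' 0 + e.2.2) else yw') yw0) yw).length = yw.length := by
  induction L generalizing yw with
  | nil => rfl
  | cons e t ih =>
    simp only [List.foldl_cons]
    rw [ih, pv_setfold_length]

-- applying a list of deltas to the profile, pointwise
theorem pv_delfold_getD (ys : List Int) (m : Nat) (L : List (Int × Int × Int)) (yw : List Int)
    (hlen : yw.length = m) (k : Nat) (hk : k < m) :
    (L.foldl (fun (yw0 : List Int) (e : Int × Int × Int) =>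
        (List.range m).foldl (fun yw' k' =>
          if e.1 ≤ ys.getD k' 0 ∧ ys.getD (k'+1) 0 ≤ e.2.1
          then yw'.set k' (yw'.getD k' 0 + e.2.2) else yw') yw0) yw).getD k 0
      = yw.getD k 0 +
        (L.map (fun e => if e.1 ≤ ys.getD k 0 ∧ ys.getD (k+1) 0 ≤ e.2.1 then e.2.2 else 0)).sum := by
  induction L generalizing yw with
  | nil => simp
  | cons e t ih =>
    simp only [List.foldl_cons, List.map_cons, List.sum_cons]
    rw [ih _ (by rw [pv_setfold_length]; exact hlen)]
    rw [pv_setfold_getD ys e.1 e.2.1 e.2.2 (List.range m) List.nodup_range yw k]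
    have heq : (k ∈ List.range m ∧ k < yw.length ∧
        (e.1 ≤ ys.getD k 0 ∧ ys.getD (k+1) 0 ≤ e.2.1))
        ↔ (e.1 ≤ ys.getD k 0 ∧ ys.getD (k+1) 0 ≤ e.2.1) := by
      simp [List.mem_range, hk, hlen]
    rw [if_congr heq rfl rfl]
    ring

-- the per-x delta list of the dict, summed against any cell test
theorem pv_del_sum (l : List Nat) (e1 e2 : Nat → Int × Int × Int × Int) (x : Int)
    (g : Int × Int × Int → Int) :
    (((l.flatMap (fun i => [e1 i, e2 i])).filter (fun p => p.1 == x)).map (fun p => g p.2)).sum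
      = (l.map (fun i => (if (e1 i).1 = x then g (e1 i).2 else 0)
          + (if (e2 i).1 = x then g (e2 i).2 else 0))).sum := by
  induction l with
  | nil => simp
  | cons i t ih =>
    simp only [List.flatMap_cons, List.filter_append, List.map_append, List.sum_append, ih,
      List.map_cons, List.sum_cons]
    congr 1
    by_cases h1 : (e1 i).1 = x <;> by_cases h2 : (e2 i).1 = x <;>
      simp [h1, h2]

-- crossing one grid gap: the new profile value is old + net delta
theorem pv_wgt_step (n : Nat) (mnx mny mxx mxy wv : Nat → Int) (ys : List Int) (k : Nat)
    (prev x : Int) (hpx : prev < x)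
    (hmm : ∀ j, j < n → mnx j ≤ mxx j)
    (hpos : ∀ j, j < n → (mnx j ≤ prev ∨ mnx j = x ∨ x < mnx j) ∧
        (mxx j ≤ prev ∨ mxx j = x ∨ x < mxx j)) :
    pvWgt n mnx mny mxx mxy wv ys x k
      = pvWgt n mnx mny mxx mxy wv ys prev k + pvDel n mnx mny mxx mxy wv ys x k := by
  unfold pvWgt pvDel
  rw [← pv_sum_map_add]
  refine congrArg List.sum (List.map_congr_left ?_)
  intro j hj
  rw [List.mem_range] at hj
  have h1 := hmm j hj
  obtain ⟨ha, hb⟩ := hpos j hj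
  rcases ha with ha | ha | ha <;> rcases hb with hb | hb | hb <;>
    split_ifs <;> omega

-- at the first sweep position (the minimum), the profile is exactly the net delta
theorem pv_wgt_head (n : Nat) (mnx mny mxx mxy wv : Nat → Int) (ys : List Int) (k : Nat)
    (x0 : Int)
    (hmm : ∀ j, j < n → mnx j ≤ mxx j)
    (hmin : ∀ j, j < n → x0 ≤ mnx j ∧ x0 ≤ mxx j) :
    pvWgt n mnx mny mxx mxy wv ys x0 k = pvDel n mnx mny mxx mxy wv ys x0 k := by
  unfold pvWgt pvDel
  refine congrArg List.sum (List.map_congr_left ?_)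
  intro j hj
  rw [List.mem_range] at hj
  have h1 := hmm j hj
  obtain ⟨ha, hb⟩ := hmin j hj
  split_ifs <;> omega

-- strict sortedness gives the gap dichotomy for members
theorem pv_mem_sorted_gap (xs : List Int) (hs : xs.Pairwise (· < ·)) (e : Int) (he : e ∈ xs)
    (i : Nat) (hi : i + 1 < xs.length) :
    (xs.getD i 0 < e) ↔ (xs.getD (i+1) 0 ≤ e) := by
  obtain ⟨t, ht, rfl⟩ := List.mem_iff_getElem.mp he
  have hmono := List.pairwise_iff_getElem.mp hs
  rw [pv_getD_eq xs 0 i (by omega), pv_getD_eq xs 0 (i+1) hi]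
  constructor
  · intro h
    by_contra hc
    push_neg at hc
    have : t ≤ i := by
      by_contra hti
      push_neg at hti
      rcases Nat.lt_or_ge (i+1) t with h2 | h2
      · exact absurd (hmono (i+1) t hi ht h2) (by omega)
      · have : t = i + 1 := by omega
        subst this; omega
    rcases Nat.lt_or_ge t i with h2 | h2
    · exact absurd (hmono t i ht (by omega) h2) (by omega)
    · have : t = i := by omega
      subst this; omega
  · intro h
    have := hmono i (i+1) (by omega) hi (by omega)
    omega

theorem pv_len_pred (l : List Int) : (if l = [] then 0 else l.length - 1) = l.length - 1 := by
  cases l <;> simp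

-- the sweep loop (A first element already consumed): invariant yw = pvWgt prev
theorem pv_sweep (n : Nat) (mnx mny mxx mxy wv : Nat → Int) (W : Int) (ys : List Int) (m : Nat)
    (del : Int → List (Int × Int × Int))
    (hdel : ∀ x, ∀ k, k < m →
      ((del x).map (fun e => if e.1 ≤ ys.getD k 0 ∧ ys.getD (k+1) 0 ≤ e.2.1 then e.2.2 else 0)).sum
        = pvDel n mnx mny mxx mxy wv ys x k)
    (hmm : ∀ j, j < n → mnx j ≤ mxx j)
    (l : List Int) (total prev : Int) (yw : List Int)
    (hlen : yw.length = m)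
    (hyw : ∀ k, k < m → yw.getD k 0 = pvWgt n mnx mny mxx mxy wv ys prev k)
    (hsort : (prev :: l).Pairwise (· < ·))
    (hmem : ∀ j, j < n → (mnx j ≤ prev ∨ mnx j ∈ l) ∧ (mxx j ≤ prev ∨ mxx j ∈ l)) :
    (l.foldl (fun (st : Int × List Int × Int × Bool) (x : Int) =>
        ((if st.2.2.2 = true then st.1
          else st.1 + ((List.range m).foldl (fun (strip : Int) (k : Nat) =>
              if W ≤ st.2.1.getD k 0
              then strip + (ys.getD (k+1) 0 - ys.getD k 0) else strip) 0) * (x - st.2.2.1)),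
         (del x).foldl (fun (yw0 : List Int) (e : Int × Int × Int) =>
            (List.range m).foldl (fun yw' k' =>
              if e.1 ≤ ys.getD k' 0 ∧ ys.getD (k'+1) 0 ≤ e.2.1
              then yw'.set k' (yw'.getD k' 0 + e.2.2) else yw') yw0) st.2.1,
         x, false))
      (total, yw, prev, false)).1
    = total + (((prev :: l).zip l).map (fun p =>
        ((List.range m).map (fun k =>
          if W ≤ pvWgt n mnx mny mxx mxy wv ys p.1 k
          then ys.getD (k+1) 0 - ys.getD k 0 else 0)).sum * (p.2 - p.1))).sum := by
  induction l generalizing total prev yw with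
  | nil => simp
  | cons x t ih =>
    have hpx : prev < x := (List.pairwise_cons.mp hsort).1 x List.mem_cons_self
    have hsort' : (x :: t).Pairwise (· < ·) := (List.pairwise_cons.mp hsort).2
    have hprevall : ∀ e ∈ t, prev < e := fun e hee =>
      (List.pairwise_cons.mp hsort).1 e (List.mem_cons_of_mem _ hee)
    have hxall : ∀ e ∈ t, x < e := fun e hee => (List.pairwise_cons.mp hsort').1 e hee
    simp only [List.foldl_cons]
    have hstrip : ((List.range m).foldl (fun (strip : Int) (k : Nat) =>
        if W ≤ yw.getD k 0 then strip + (ys.getD (k+1) 0 - ys.getD k 0) else strip) 0)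
        = ((List.range m).map (fun k =>
            if W ≤ pvWgt n mnx mny mxx mxy wv ys prev k
            then ys.getD (k+1) 0 - ys.getD k 0 else 0)).sum := by
      rw [pv_foldl_addif, zero_add]
      refine congrArg List.sum (List.map_congr_left ?_)
      intro k hk
      rw [List.mem_range] at hk
      rw [hyw k hk]
    have hywlen' : ((del x).foldl (fun (yw0 : List Int) (e : Int × Int × Int) =>
        (List.range m).foldl (fun yw' k' =>
          if e.1 ≤ ys.getD k' 0 ∧ ys.getD (k'+1) 0 ≤ e.2.1
          then yw'.set k' (yw'.getD k' 0 + e.2.2) else yw') yw0) yw).length = m := by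
      rw [pv_delfold_length]; exact hlen
    have hyw' : ∀ k, k < m →
        ((del x).foldl (fun (yw0 : List Int) (e : Int × Int × Int) =>
          (List.range m).foldl (fun yw' k' =>
            if e.1 ≤ ys.getD k' 0 ∧ ys.getD (k'+1) 0 ≤ e.2.1
            then yw'.set k' (yw'.getD k' 0 + e.2.2) else yw') yw0) yw).getD k 0
        = pvWgt n mnx mny mxx mxy wv ys x k := by
      intro k hk
      rw [pv_delfold_getD ys m (del x) yw hlen k hk, hyw k hk, hdel x k hk]
      refine (pv_wgt_step n mnx mny mxx mxy wv ys k prev x hpx hmm ?_).symm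
      intro j hj
      obtain ⟨ha, hb⟩ := hmem j hj
      constructor
      · rcases ha with ha | ha
        · exact Or.inl ha
        · rcases List.mem_cons.mp ha with rfl | hat
          · exact Or.inr (Or.inl rfl)
          · exact Or.inr (Or.inr (hxall _ hat))
      · rcases hb with hb | hb
        · exact Or.inl hb
        · rcases List.mem_cons.mp hb with rfl | hbt
          · exact Or.inr (Or.inl rfl)
          · exact Or.inr (Or.inr (hxall _ hbt))
    have hmem' : ∀ j, j < n → (mnx j ≤ x ∨ mnx j ∈ t) ∧ (mxx j ≤ x ∨ mxx j ∈ t) := by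
      intro j hj
      obtain ⟨ha, hb⟩ := hmem j hj
      constructor
      · rcases ha with ha | ha
        · exact Or.inl (by omega)
        · rcases List.mem_cons.mp ha with rfl | hat
          · exact Or.inl le_rfl
          · exact Or.inr hat
      · rcases hb with hb | hb
        · exact Or.inl (by omega)
        · rcases List.mem_cons.mp hb with rfl | hbt
          · exact Or.inl le_rfl
          · exact Or.inr hbt
    rw [ih _ _ _ hywlen' hyw' hsort' hmem']
    simp only [if_neg (by simp : ¬ ((false : Bool) = true)), hstrip]
    simp only [List.zip_cons_cons, List.map_cons, List.sum_cons]
    ring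

-- B's whole main loop equals the grid double sum, for any strictly sorted xs containing the endpoints
theorem pv_B_main (n : Nat) (mnx mny mxx mxy wv : Nat → Int) (W : Int)
    (xs ys : List Int) (m : Nat) (hm : m = ys.length - 1)
    (del : Int → List (Int × Int × Int))
    (hdel : ∀ x, ∀ k, k < m →
      ((del x).map (fun e => if e.1 ≤ ys.getD k 0 ∧ ys.getD (k+1) 0 ≤ e.2.1 then e.2.2 else 0)).sum
        = pvDel n mnx mny mxx mxy wv ys x k)
    (hmm : ∀ j, j < n → mnx j ≤ mxx j)
    (hxs : xs.Pairwise (· < ·))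
    (hmemx : ∀ j, j < n → mnx j ∈ xs ∧ mxx j ∈ xs) :
    (xs.foldl (fun (st : Int × List Int × Int × Bool) (x : Int) =>
        ((if st.2.2.2 = true then st.1
          else st.1 + ((List.range m).foldl (fun (strip : Int) (k : Nat) =>
              if W ≤ st.2.1.getD k 0
              then strip + (ys.getD (k+1) 0 - ys.getD k 0) else strip) 0) * (x - st.2.2.1)),
         (del x).foldl (fun (yw0 : List Int) (e : Int × Int × Int) =>
            (List.range m).foldl (fun yw' k' =>
              if e.1 ≤ ys.getD k' 0 ∧ ys.getD (k'+1) 0 ≤ e.2.1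
              then yw'.set k' (yw'.getD k' 0 + e.2.2) else yw') yw0) st.2.1,
         x, false))
      (0, List.replicate m 0, 0, true)).1
    = ((List.range (xs.length - 1)).map (fun i =>
        ((List.range (ys.length - 1)).map (fun k =>
          if W ≤ ((List.range n).map (fun j =>
                if mnx j ≤ xs.getD i 0 ∧ xs.getD (i+1) 0 ≤ mxx j ∧
                   mny j ≤ ys.getD k 0 ∧ ys.getD (k+1) 0 ≤ mxy j
                then wv j else 0)).sum
          then (xs.getD (i+1) 0 - xs.getD i 0) * (ys.getD (k+1) 0 - ys.getD k 0)
          else 0)).sum)).sum := by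
  cases xs with
  | nil => simp
  | cons x0 rest =>
    have hx0min : ∀ e, e ∈ x0 :: rest → x0 ≤ e := by
      intro e he
      rcases List.mem_cons.mp he with rfl | het
      · exact le_rfl
      · exact le_of_lt ((List.pairwise_cons.mp hxs).1 e het)
    simp only [List.foldl_cons]
    rw [if_pos trivial]
    have hyw1 : ∀ k, k < m →
        ((del x0).foldl (fun (yw0 : List Int) (e : Int × Int × Int) =>
          (List.range m).foldl (fun yw' k' =>
            if e.1 ≤ ys.getD k' 0 ∧ ys.getD (k'+1) 0 ≤ e.2.1
            then yw'.set k' (yw'.getD k' 0 + e.2.2) else yw') yw0) (List.replicate m 0)).getD k 0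
        = pvWgt n mnx mny mxx mxy wv ys x0 k := by
      intro k hk
      rw [pv_delfold_getD ys m (del x0) (List.replicate m 0) (by simp) k hk,
        List.getD_replicate _ hk, zero_add, hdel x0 k hk]
      refine (pv_wgt_head n mnx mny mxx mxy wv ys k x0 hmm ?_).symm
      intro j hj
      exact ⟨hx0min _ (hmemx j hj).1, hx0min _ (hmemx j hj).2⟩
    have hlen1 : ((del x0).foldl (fun (yw0 : List Int) (e : Int × Int × Int) =>
        (List.range m).foldl (fun yw' k' =>
          if e.1 ≤ ys.getD k' 0 ∧ ys.getD (k'+1) 0 ≤ e.2.1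
          then yw'.set k' (yw'.getD k' 0 + e.2.2) else yw') yw0) (List.replicate m 0)).length = m := by
      rw [pv_delfold_length]; simp
    have hmem1 : ∀ j, j < n → (mnx j ≤ x0 ∨ mnx j ∈ rest) ∧ (mxx j ≤ x0 ∨ mxx j ∈ rest) := by
      intro j hj
      obtain ⟨ha, hb⟩ := hmemx j hj
      constructor
      · rcases List.mem_cons.mp ha with h | h
        · exact Or.inl (le_of_eq h)
        · exact Or.inr h
      · rcases List.mem_cons.mp hb with h | h
        · exact Or.inl (le_of_eq h)
        · exact Or.inr h
    rw [pv_sweep n mnx mny mxx mxy wv W ys m del hdel hmm rest 0 x0 _ hlen1 hyw1 hxs hmem1,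
      zero_add]
    have hzip := pv_zip_tail_int (x0 :: rest)
    simp only [List.tail_cons] at hzip
    rw [hzip, List.map_map]
    refine congrArg List.sum (List.map_congr_left ?_)
    intro i hi
    rw [List.mem_range] at hi
    simp only [Function.comp_apply, hm]
    rw [pv_sum_ite_mul]
    refine congrArg List.sum (List.map_congr_left ?_)
    intro k hk
    rw [List.mem_range] at hk
    have hcond : pvWgt n mnx mny mxx mxy wv ys ((x0 :: rest).getD i 0) k
        = ((List.range n).map (fun j =>
            if mnx j ≤ (x0 :: rest).getD i 0 ∧ (x0 :: rest).getD (i+1) 0 ≤ mxx j ∧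
               mny j ≤ ys.getD k 0 ∧ ys.getD (k+1) 0 ≤ mxy j
            then wv j else 0)).sum := by
      unfold pvWgt
      refine congrArg List.sum (List.map_congr_left ?_)
      intro j hj
      rw [List.mem_range] at hj
      have hgap := pv_mem_sorted_gap (x0 :: rest) hxs (mxx j) (hmemx j hj).2 i
        (by simpa using (by omega : i + 1 < (x0 :: rest).length))
      split_ifs <;> omega
    rw [hcond]

-- B's port equals the common normal form
set_option maxHeartbeats 3200000 in
theorem pv_B_eq_core (x1 y1 x2 y2 w : List Int) (W : Int) :
    weighted_area_alt x1 y1 x2 y2 w W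
      = pvCore x1.length
          (fun i => min (PySem.List.pyGetD x1 (i : Int) 0) (PySem.List.pyGetD x2 (i : Int) 0))
          (fun i => min (PySem.List.pyGetD y1 (i : Int) 0) (PySem.List.pyGetD y2 (i : Int) 0))
          (fun i => max (PySem.List.pyGetD x1 (i : Int) 0) (PySem.List.pyGetD x2 (i : Int) 0))
          (fun i => max (PySem.List.pyGetD y1 (i : Int) 0) (PySem.List.pyGetD y2 (i : Int) 0))
          (fun i => PySem.List.pyGetD w (i : Int) 0) W := by
  simp only [weighted_area_alt, pvCore, ge_iff_le, ← Nat.cast_add_one,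
    PySem.List.pyGetD_natCast, PySem.List.pySetD_natCast]
  rw [PySem.List.foldl_append_eq_flatMap]
  simp only [List.nil_append]
  simp only [PySem.Dict.getD_foldl_modify_append, PySem.Dict.getD_empty, List.nil_append,
    PySem.Dict.keys_foldl_modify_key, PySem.Dict.keys_empty, PySem.Set.update_nil_left]
  simp only [pv_len_pred]
  simp only [pv_sorted_union_ofList]
  simp only [pv_sorted_ofList_congr
      (((List.range x1.length).flatMap (fun i =>
        [(min (x1.getD i 0) (x2.getD i 0), min (y1.getD i 0) (y2.getD i 0),
          max (y1.getD i 0) (y2.getD i 0), w.getD i 0),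
         (max (x1.getD i 0) (x2.getD i 0), min (y1.getD i 0) (y2.getD i 0),
          max (y1.getD i 0) (y2.getD i 0), -(w.getD i 0))])).map (fun p => p.2.1)
        ++ ((List.range x1.length).flatMap (fun i =>
        [(min (x1.getD i 0) (x2.getD i 0), min (y1.getD i 0) (y2.getD i 0),
          max (y1.getD i 0) (y2.getD i 0), w.getD i 0),
         (max (x1.getD i 0) (x2.getD i 0), min (y1.getD i 0) (y2.getD i 0),
          max (y1.getD i 0) (y2.getD i 0), -(w.getD i 0))])).map (fun p => p.2.2.1))
      ((List.range x1.length).map (fun i => min (y1.getD i 0) (y2.getD i 0))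
        ++ (List.range x1.length).map (fun i => max (y1.getD i 0) (y2.getD i 0)))
      (by
        intro v
        simp only [List.mem_append, List.mem_map, List.mem_flatMap, List.mem_range,
          List.mem_cons, List.not_mem_nil, or_false]
        aesop)]
  simp only [pv_sorted_ofList_congr
      (((List.range x1.length).flatMap (fun i =>
        [(min (x1.getD i 0) (x2.getD i 0), min (y1.getD i 0) (y2.getD i 0),
          max (y1.getD i 0) (y2.getD i 0), w.getD i 0),
         (max (x1.getD i 0) (x2.getD i 0), min (y1.getD i 0) (y2.getD i 0),
          max (y1.getD i 0) (y2.getD i 0), -(w.getD i 0))])).map Prod.fst)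
      ((List.range x1.length).map (fun i => min (x1.getD i 0) (x2.getD i 0))
        ++ (List.range x1.length).map (fun i => max (x1.getD i 0) (x2.getD i 0)))
      (by
        intro v
        simp only [List.mem_append, List.mem_map, List.mem_flatMap, List.mem_range,
          List.mem_cons, List.not_mem_nil, or_false]
        aesop)]
  refine pv_B_main x1.length
      (fun i => min (x1.getD i 0) (x2.getD i 0))
      (fun i => min (y1.getD i 0) (y2.getD i 0))
      (fun i => max (x1.getD i 0) (x2.getD i 0))
      (fun i => max (y1.getD i 0) (y2.getD i 0))
      (fun i => w.getD i 0) W _ _ _ rfl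
      (fun x => (((List.range x1.length).flatMap (fun i =>
        [(min (x1.getD i 0) (x2.getD i 0), min (y1.getD i 0) (y2.getD i 0),
          max (y1.getD i 0) (y2.getD i 0), w.getD i 0),
         (max (x1.getD i 0) (x2.getD i 0), min (y1.getD i 0) (y2.getD i 0),
          max (y1.getD i 0) (y2.getD i 0), -(w.getD i 0))])).filter
            (fun p => p.1 == x)).map (fun p => p.2))
      ?_ (fun j _ => min_le_max) (PySem.List.sorted_ofList_pairwise_lt _) ?_
  · intro x k hk
    rw [List.map_map]
    simp only [Function.comp_def]
    exact pv_del_sum (List.range x1.length)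
      (fun i => (min (x1.getD i 0) (x2.getD i 0), min (y1.getD i 0) (y2.getD i 0),
        max (y1.getD i 0) (y2.getD i 0), w.getD i 0))
      (fun i => (max (x1.getD i 0) (x2.getD i 0), min (y1.getD i 0) (y2.getD i 0),
        max (y1.getD i 0) (y2.getD i 0), -(w.getD i 0)))
      x
      (fun e => if e.1 ≤ (PySem.List.sorted (PySem.Set.ofList
            ((List.range x1.length).map (fun i => min (y1.getD i 0) (y2.getD i 0))
              ++ (List.range x1.length).map (fun i => max (y1.getD i 0) (y2.getD i 0))))
            (fun v => v)).getD k 0 ∧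
          (PySem.List.sorted (PySem.Set.ofList
            ((List.range x1.length).map (fun i => min (y1.getD i 0) (y2.getD i 0))
              ++ (List.range x1.length).map (fun i => max (y1.getD i 0) (y2.getD i 0))))
            (fun v => v)).getD (k+1) 0 ≤ e.2.1
        then e.2.2 else 0)
  · intro j hj
    constructor <;>
      · rw [PySem.List.mem_sorted, PySem.Set.mem_ofList]
        simp only [List.mem_append, List.mem_map, List.mem_range]
        first
          | exact Or.inl ⟨j, hj, rfl⟩
          | exact Or.inr ⟨j, hj, rfl⟩

-- ===== VERDICT (by name: the statement is the Claim_ definition above) =====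
theorem weighted_area_spec : Claim_equal_weighted_area := by
  intro x1 y1 x2 y2 w W _ hPre
  unfold Spec_weighted_area
  rw [pv_A_eq_core x1 y1 x2 y2 w W hPre.2.2.2.2, pv_B_eq_core]
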